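-- pv_equiv track=rewrite | github.com/roby-avo/moose | scripts/build_gdpr_artifacts.py | shorten_gdpr_iri
-- ===== SOURCE A (Python) =====
-- def shorten_gdpr_iri(iri: str) -> str:
--     """
--     Convert GDPRtEXT IRIs into compact IDs.
--
--     Common patterns seen in GDPRtEXT:
--       https://w3id.org/GDPRtEXT#X
--       https://w3id.org/GDPRtEXT/gdpr#A5
--       https://w3id.org/GDPRtEXT/terms#PersonalData
--     We normalize to:
--       gdprtext:X
--       gdprtext-gdpr:A5
--       gdprtext-terms:PersonalData
--     """
--     if not isinstance(iri, str):
--         return str(iri)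
--
--     for base in ("https://w3id.org/GDPRtEXT/", "http://w3id.org/GDPRtEXT/"):
--         if iri.startswith(base):
--             rest = iri[len(base) :]
--             if rest.startswith("#"):
--                 return f"gdprtext:{rest[1:]}"
--             if "#" in rest:
--                 namespace, local = rest.split("#", 1)
--                 namespace = namespace.strip("/").replace("/", "_")
--                 return f"gdprtext-{namespace}:{local}"
--             # fallback
--             return f"gdprtext:{rest.strip('/')}"
--     for base in ("https://w3id.org/GDPRtEXT#", "http://w3id.org/GDPRtEXT#"):
--         if iri.startswith(base):
--             return f"gdprtext:{iri[len(base):]}"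
--     return iri
-- ===== SOURCE B (Python) =====
-- def shorten_gdpr_iri(iri: str) -> str:
--     if not isinstance(iri, str):
--         return str(iri)
--     # Split the IRI at its first '#' once, then classify the fragment-free head.
--     head, sep, frag = iri.partition("#")
--     for scheme in ("https", "http"):
--         p = scheme + "://w3id.org/GDPRtEXT"
--         if head == p:
--             return f"gdprtext:{frag}" if sep else iri
--         if head.startswith(p + "/"):
--             tail = head[len(p) + 1:]
--             if not sep:
--                 return f"gdprtext:{tail.strip('/')}"
--             if not tail:
--                 return f"gdprtext:{frag}"
--             return f"gdprtext-{tail.strip('/').replace('/', '_')}:{frag}"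
--     return iri
-- ===== Notes on version B (the rewrite author's own statement) =====
-- stated objective: alternative
-- what changed: B partitions the IRI at its first '#' once and then classifies the fragment-free head (exact base / base-plus-path) with an empty-tail/empty-fragment dispatch, whereas A probes the whole IRI against four full base prefixes and then searches and splits on '#' inside the remainder.
import Mathlib
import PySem

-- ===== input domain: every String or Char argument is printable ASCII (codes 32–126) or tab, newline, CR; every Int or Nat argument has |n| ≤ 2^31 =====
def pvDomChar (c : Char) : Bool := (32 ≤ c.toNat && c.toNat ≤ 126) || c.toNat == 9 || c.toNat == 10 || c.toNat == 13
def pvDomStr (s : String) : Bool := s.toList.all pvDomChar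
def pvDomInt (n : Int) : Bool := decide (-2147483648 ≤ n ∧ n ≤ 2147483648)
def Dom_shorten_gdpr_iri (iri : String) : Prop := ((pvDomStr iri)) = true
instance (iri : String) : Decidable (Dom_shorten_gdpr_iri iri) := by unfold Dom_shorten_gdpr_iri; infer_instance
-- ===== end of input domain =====

-- B partitions the IRI at its first '#' once and classifies the fragment-free head, instead of A's four full-base prefix probes followed by '#'-searching/splitting inside the remainder (objective: alternative decomposition, same cost).

-- ===== PORT A =====
-- body of A's first loop ("…GDPRtEXT/" bases), applied to rest = iri[len(base):]
def pvShortenRest (rest : List Char) : List Char :=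
  if PySem.Chars.startswith rest "#".toList then
    "gdprtext:".toList ++ PySem.List.slice rest (some 1) none
  else if PySem.Chars.isIn "#".toList rest then
    match PySem.Chars.splitOnMax rest "#".toList 1 with
    | [ns, loc] =>
        "gdprtext-".toList ++
          PySem.Chars.replace (PySem.Chars.stripChars ns "/".toList) "/".toList "_".toList ++
          ":".toList ++ loc
    | _ => []  -- unreachable: '#' in rest means split('#', 1) yields exactly two pieces
  else "gdprtext:".toList ++ PySem.Chars.stripChars rest "/".toList

def shorten_gdpr_iri (iri : String) : String :=
  -- the two for-loops over literal base tuples, unrolled with early return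
  if PySem.Chars.startswith iri.toList "https://w3id.org/GDPRtEXT/".toList then
    String.ofList (pvShortenRest (PySem.List.slice iri.toList (some 26) none))
  else if PySem.Chars.startswith iri.toList "http://w3id.org/GDPRtEXT/".toList then
    String.ofList (pvShortenRest (PySem.List.slice iri.toList (some 25) none))
  else if PySem.Chars.startswith iri.toList "https://w3id.org/GDPRtEXT#".toList then
    String.ofList ("gdprtext:".toList ++ PySem.List.slice iri.toList (some 26) none)
  else if PySem.Chars.startswith iri.toList "http://w3id.org/GDPRtEXT#".toList then
    String.ofList ("gdprtext:".toList ++ PySem.List.slice iri.toList (some 25) none)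
  else iri

-- ===== PORT B =====
-- exact hand port of str.partition('#') (PySem has no partition): (head, sep-found, fragment)
def pvPartition : List Char → List Char × Bool × List Char
  | [] => ([], false, [])
  | c :: t =>
    if c = '#' then ([], true, t)
    else
      match pvPartition t with
      | (h, s, f) => (c :: h, s, f)

-- one iteration of Source B's `for scheme in ("https", "http")` loop body (p = scheme base), some = early return
def pvTryScheme (iri : List Char) (p : List Char) (head : List Char) (sep : Bool)
    (frag : List Char) : Option (List Char) :=
  if head = p then
    some (if sep then "gdprtext:".toList ++ frag else iri)
  else if PySem.Chars.startswith head (p ++ "/".toList) then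
    let tail := PySem.List.slice head (some ((p.length : Int) + 1)) none
    some (if sep = false then
            "gdprtext:".toList ++ PySem.Chars.stripChars tail "/".toList
          else if tail = [] then
            "gdprtext:".toList ++ frag
          else
            "gdprtext-".toList ++
              PySem.Chars.replace (PySem.Chars.stripChars tail "/".toList) "/".toList "_".toList ++
              ":".toList ++ frag)
  else none

def shorten_gdpr_iri_alt (iri : String) : String :=
  match pvPartition iri.toList with
  | (head, sep, frag) =>
    match pvTryScheme iri.toList "https://w3id.org/GDPRtEXT".toList head sep frag with
    | some r => String.ofList r
    | none =>
      match pvTryScheme iri.toList "http://w3id.org/GDPRtEXT".toList head sep frag with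
      | some r => String.ofList r
      | none => iri

-- ===== PRECONDITION & SPEC =====
def Spec_shorten_gdpr_iri (iri : String) (out : String) : Prop := out = shorten_gdpr_iri_alt iri
instance (iri : String) (out : String) : Decidable (Spec_shorten_gdpr_iri iri out) := by unfold Spec_shorten_gdpr_iri; infer_instance

-- ===== CLAIM (what is proved, stated in full; the proofs are below) =====
def Claim_equal_shorten_gdpr_iri : Prop := ∀ (iri : String), Dom_shorten_gdpr_iri iri → Spec_shorten_gdpr_iri iri (shorten_gdpr_iri iri)

-- ===== LEMMAS AND PROOFS =====

theorem pvPartition_hash (a f : List Char) (h : '#' ∉ a) :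
    pvPartition (a ++ '#' :: f) = (a, true, f) := by
  induction a with
  | nil => simp [pvPartition]
  | cons c t ih =>
    simp at h
    have hc : ¬ c = '#' := fun hc => h.1 hc.symm
    simp [pvPartition, hc, ih h.2]

theorem splitOnMax_go_zero (fuel : Nat) (f : List Char) (acc : List (List Char)) :
    PySem.Chars.splitOnMax.go ['#'] fuel 0 f [] acc = (f :: acc).reverse := by
  cases fuel with
  | zero => simp [PySem.Chars.splitOnMax.go]
  | succ n =>
    cases f with
    | nil => simp [PySem.Chars.splitOnMax.go]
    | cons c r => simp [PySem.Chars.splitOnMax.go]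

theorem splitOnMax_go_one (a : List Char) (h : '#' ∉ a) :
    ∀ (fuel : Nat) (f cur : List Char) (acc : List (List Char)), a.length < fuel →
      PySem.Chars.splitOnMax.go ['#'] fuel 1 (a ++ '#' :: f) cur acc =
        (f :: (cur.reverse ++ a) :: acc).reverse := by
  induction a with
  | nil =>
    intro fuel f cur acc hf
    cases fuel with
    | zero => omega
    | succ n =>
      simp [PySem.Chars.splitOnMax.go, List.isPrefixOf, splitOnMax_go_zero]
  | cons c t ih =>
    intro fuel f cur acc hf
    simp at h
    cases fuel with
    | zero => simp at hf
    | succ n =>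
      simp [PySem.Chars.splitOnMax.go, List.isPrefixOf, h.1]
      rw [ih h.2 n f (c :: cur) acc (by simp at hf ⊢; omega)]
      simp

theorem splitOnMax_hash (a f : List Char) (h : '#' ∉ a) :
    PySem.Chars.splitOnMax (a ++ '#' :: f) ['#'] 1 = [a, f] := by
  unfold PySem.Chars.splitOnMax
  rw [if_neg (by norm_num)]
  show PySem.Chars.splitOnMax.go ['#'] ((a ++ '#' :: f).length + 1) 1 (a ++ '#' :: f) [] [] = [a, f]
  rw [splitOnMax_go_one a h _ f [] [] (by simp)]
  rfl

theorem isIn_hash_false (t : List Char) (h : '#' ∉ t) :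
    PySem.Chars.isIn ['#'] t = false := by
  rw [PySem.Chars.isIn_eq_false_iff]
  intro hinf
  exact h (hinf.subset (by simp))

theorem isIn_hash_true (a f : List Char) :
    PySem.Chars.isIn ['#'] (a ++ '#' :: f) = true := by
  rw [PySem.Chars.isIn_iff_infix]
  exact ⟨a, f, by simp⟩

theorem startswith_hash_false (t : List Char) (h : '#' ∉ t) :
    PySem.Chars.startswith t ['#'] = false := by
  cases hs : PySem.Chars.startswith t ['#']
  · rfl
  · obtain ⟨r, hr⟩ := (PySem.Chars.startswith_iff _ _).mp hs
    rw [← hr] at h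
    simp at h

-- pvShortenRest on the three shapes of rest
theorem pvShortenRest_no_hash (t : List Char) (h : '#' ∉ t) :
    pvShortenRest t = "gdprtext:".toList ++ PySem.Chars.stripChars t "/".toList := by
  simp [pvShortenRest, startswith_hash_false t h, isIn_hash_false t h]

theorem pvShortenRest_lead_hash (f : List Char) :
    pvShortenRest ('#' :: f) = "gdprtext:".toList ++ f := by
  have hsw : PySem.Chars.startswith ('#' :: f) ['#'] = true :=
    (PySem.Chars.startswith_iff _ _).mpr ⟨f, rfl⟩
  simp [pvShortenRest, hsw, PySem.List.slice_from_one]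

theorem pvShortenRest_mid_hash (a f : List Char) (ha : a ≠ []) (h : '#' ∉ a) :
    pvShortenRest (a ++ '#' :: f) =
      "gdprtext-".toList ++
        PySem.Chars.replace (PySem.Chars.stripChars a "/".toList) "/".toList "_".toList ++
        ":".toList ++ f := by
  have hsw : PySem.Chars.startswith (a ++ '#' :: f) ['#'] = false := by
    cases hs : PySem.Chars.startswith (a ++ '#' :: f) ['#']
    · rfl
    · obtain ⟨r, hr⟩ := (PySem.Chars.startswith_iff _ _).mp hs
      cases a with
      | nil => exact absurd rfl ha
      | cons c t =>
        simp at hr h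
        exact absurd hr.1 h.1
  unfold pvShortenRest
  rw [show PySem.Chars.startswith (a ++ '#' :: f) "#".toList = false from hsw,
    show PySem.Chars.isIn "#".toList (a ++ '#' :: f) = true from isIn_hash_true a f,
    show PySem.Chars.splitOnMax (a ++ '#' :: f) "#".toList 1 = [a, f] from splitOnMax_hash a f h]
  simp

theorem pvPartition_append (p : List Char) (hp : '#' ∉ p) (t : List Char) :
    pvPartition (p ++ t) =
      (p ++ (pvPartition t).1, (pvPartition t).2.1, (pvPartition t).2.2) := by
  induction p with
  | nil => simp
  | cons c q ih =>
    simp at hp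
    have hc : ¬ c = '#' := fun hce => hp.1 hce.symm
    simp only [List.cons_append, pvPartition, hc, if_false]
    rw [ih hp.2]

theorem pvPartition_spec (l a : List Char) (s : Bool) (f : List Char)
    (h : pvPartition l = (a, s, f)) :
    '#' ∉ a ∧ (s = true → l = a ++ '#' :: f) ∧ (s = false → a = l ∧ f = []) := by
  induction l generalizing a s f with
  | nil =>
    simp [pvPartition] at h
    obtain ⟨rfl, rfl, rfl⟩ := h
    simp
  | cons c t ih =>
    by_cases hc : c = '#'
    · subst hc
      simp [pvPartition] at h
      obtain ⟨rfl, rfl, rfl⟩ := h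
      simp
    · rcases hpt : pvPartition t with ⟨a', s', f'⟩
      simp [pvPartition, hc, hpt] at h
      obtain ⟨rfl, rfl, rfl⟩ := h
      obtain ⟨h1, h2, h3⟩ := ih _ _ _ hpt
      have hc' : ¬ '#' = c := fun he => hc he.symm
      refine ⟨by simp [hc', h1], fun hs => by rw [h2 hs]; simp, fun hs => ?_⟩
      obtain ⟨rfl, rfl⟩ := h3 hs
      simp

-- pvTryScheme on the three head shapes it accepts / rejects
theorem tryScheme_self (iri p : List Char) (s : Bool) (f : List Char) :
    pvTryScheme iri p p s f = some (if s then "gdprtext:".toList ++ f else iri) := by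
  simp [pvTryScheme]

theorem tryScheme_slash (iri p : List Char) (hp : PySem.Chars.isIn ['#'] p = false)
    (h : List Char) (s : Bool) (f : List Char) :
    pvTryScheme iri p (p ++ '/' :: h) s f =
      some (if s = false then "gdprtext:".toList ++ PySem.Chars.stripChars h "/".toList
            else if h = [] then "gdprtext:".toList ++ f
            else "gdprtext-".toList ++
              PySem.Chars.replace (PySem.Chars.stripChars h "/".toList) "/".toList "_".toList ++
              ":".toList ++ f) := by
  have hne : ¬ p ++ '/' :: h = p := by
    intro he
    have := congrArg List.length he
    simp at this
  have hsw : PySem.Chars.startswith (p ++ '/' :: h) (p ++ "/".toList) = true :=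
    (PySem.Chars.startswith_iff _ _).mpr ⟨h, by simp⟩
  have htail : PySem.List.slice (p ++ '/' :: h) (some ((p.length : Int) + 1)) none = h := by
    rw [show ((p.length : Int) + 1) = ((p.length + 1 : Nat) : Int) by push_cast; ring,
      PySem.List.slice_from _ (by positivity), Int.toNat_natCast,
      show p ++ '/' :: h = (p ++ ['/']) ++ h by simp]
    exact List.drop_left' (by simp)
  simp only [pvTryScheme, hne, if_false, hsw, if_true, htail]

theorem tryScheme_none (iri p a : List Char) (s : Bool) (f : List Char)
    (hne : ¬ a = p) (hsw : ¬ PySem.Chars.startswith a (p ++ "/".toList) = true) :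
    pvTryScheme iri p a s f = none := by
  have hsw' : PySem.Chars.startswith a (p ++ ['/']) = false := by
    cases hb : PySem.Chars.startswith a (p ++ ['/'])
    · rfl
    · exact absurd (by simpa using hb) hsw
  simp [pvTryScheme, hne, hsw']

-- the https scheme rejects any head built from the http base
theorem tryScheme_https_http_head (iri : List Char) (s : Bool) (f : List Char) :
    pvTryScheme iri "https://w3id.org/GDPRtEXT".toList "http://w3id.org/GDPRtEXT".toList s f =
      none :=
  tryScheme_none _ _ _ _ _ (by decide) (by decide)

theorem tryScheme_https_http_slash (iri h : List Char) (s : Bool) (f : List Char) :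
    pvTryScheme iri "https://w3id.org/GDPRtEXT".toList
      ("http://w3id.org/GDPRtEXT".toList ++ '/' :: h) s f = none := by
  refine tryScheme_none _ _ _ _ _ ?_ ?_
  · intro he
    have := congrArg (fun l => l[4]?) he
    simp at this
  · intro hs
    obtain ⟨r, hr⟩ := (PySem.Chars.startswith_iff _ _).mp hs
    have := congrArg (fun l => l[4]?) hr
    simp at this

-- the common "GDPRtEXT/" case: A's loop-1 body vs B's partition-of-t dispatch
theorem slash_case (t : List Char) :
    pvShortenRest t =
      (if (pvPartition t).2.1 = false then
        "gdprtext:".toList ++ PySem.Chars.stripChars (pvPartition t).1 "/".toList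
      else if (pvPartition t).1 = [] then "gdprtext:".toList ++ (pvPartition t).2.2
      else "gdprtext-".toList ++
        PySem.Chars.replace (PySem.Chars.stripChars (pvPartition t).1 "/".toList)
          "/".toList "_".toList ++ ":".toList ++ (pvPartition t).2.2) := by
  rcases hpt : pvPartition t with ⟨a, s, f⟩
  obtain ⟨hna, hs1, hs0⟩ := pvPartition_spec t a s f hpt
  cases s with
  | false =>
    obtain ⟨rfl, rfl⟩ := hs0 rfl
    simp [pvShortenRest_no_hash _ hna]
  | true =>
    have hteq := hs1 rfl
    subst hteq
    by_cases ha : a = []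
    · subst ha
      simpa using pvShortenRest_lead_hash f
    · simp [ha, pvShortenRest_mid_hash a f ha hna]

set_option maxHeartbeats 1000000 in
theorem main_eq (iri : String) : shorten_gdpr_iri iri = shorten_gdpr_iri_alt iri := by
  by_cases h1 : PySem.Chars.startswith iri.toList "https://w3id.org/GDPRtEXT/".toList = true
  · obtain ⟨t, ht⟩ := (PySem.Chars.startswith_iff _ _).mp h1
    have hslice : PySem.List.slice iri.toList (some 26) none = t := by
      rw [← ht, PySem.List.slice_from _ (by norm_num)]
      exact List.drop_left' (by decide)
    rcases hpt : pvPartition t with ⟨a, s, f⟩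
    have hpart : pvPartition iri.toList =
        ("https://w3id.org/GDPRtEXT".toList ++ '/' :: a, s, f) := by
      rw [← ht, pvPartition_append _ (by decide) t, hpt]
      rfl
    have hB : shorten_gdpr_iri_alt iri =
        String.ofList (if s = false then
            "gdprtext:".toList ++ PySem.Chars.stripChars a "/".toList
          else if a = [] then "gdprtext:".toList ++ f
          else "gdprtext-".toList ++
            PySem.Chars.replace (PySem.Chars.stripChars a "/".toList) "/".toList "_".toList ++
            ":".toList ++ f) := by
      unfold shorten_gdpr_iri_alt
      rw [hpart]
      simp only []
      rw [tryScheme_slash _ _ (by decide) a s f]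
    rw [hB]
    simp only [shorten_gdpr_iri, h1, if_true, hslice]
    rw [slash_case t, hpt]
  · by_cases h2 : PySem.Chars.startswith iri.toList "http://w3id.org/GDPRtEXT/".toList = true
    · obtain ⟨t, ht⟩ := (PySem.Chars.startswith_iff _ _).mp h2
      have hslice : PySem.List.slice iri.toList (some 25) none = t := by
        rw [← ht, PySem.List.slice_from _ (by norm_num)]
        exact List.drop_left' (by decide)
      rcases hpt : pvPartition t with ⟨a, s, f⟩
      have hpart : pvPartition iri.toList =
          ("http://w3id.org/GDPRtEXT".toList ++ '/' :: a, s, f) := by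
        rw [← ht, pvPartition_append _ (by decide) t, hpt]
        rfl
      have hB : shorten_gdpr_iri_alt iri =
          String.ofList (if s = false then
              "gdprtext:".toList ++ PySem.Chars.stripChars a "/".toList
            else if a = [] then "gdprtext:".toList ++ f
            else "gdprtext-".toList ++
              PySem.Chars.replace (PySem.Chars.stripChars a "/".toList) "/".toList "_".toList ++
              ":".toList ++ f) := by
        unfold shorten_gdpr_iri_alt
        rw [hpart]
        simp only []
        rw [tryScheme_https_http_slash, tryScheme_slash _ _ (by decide) a s f]
      rw [hB]
      simp only [Bool.not_eq_true] at h1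
      simp only [shorten_gdpr_iri, h1, Bool.false_eq_true, if_false, h2, if_true, hslice]
      rw [slash_case t, hpt]
    · by_cases h3 : PySem.Chars.startswith iri.toList "https://w3id.org/GDPRtEXT#".toList = true
      · obtain ⟨t, ht⟩ := (PySem.Chars.startswith_iff _ _).mp h3
        have hslice : PySem.List.slice iri.toList (some 26) none = t := by
          rw [← ht, PySem.List.slice_from _ (by norm_num)]
          exact List.drop_left' (by decide)
        have hpart : pvPartition iri.toList =
            ("https://w3id.org/GDPRtEXT".toList, true, t) := by
          rw [← ht]
          show pvPartition ("https://w3id.org/GDPRtEXT".toList ++ '#' :: t) = _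
          exact pvPartition_hash _ t (by decide)
        have hB : shorten_gdpr_iri_alt iri = String.ofList ("gdprtext:".toList ++ t) := by
          unfold shorten_gdpr_iri_alt
          rw [hpart]
          simp only []
          rw [tryScheme_self]
          simp
        rw [hB]
        simp only [Bool.not_eq_true] at h1 h2
        simp only [shorten_gdpr_iri, h1, h2, Bool.false_eq_true, if_false, h3, if_true, hslice]
      · by_cases h4 : PySem.Chars.startswith iri.toList "http://w3id.org/GDPRtEXT#".toList = true
        · obtain ⟨t, ht⟩ := (PySem.Chars.startswith_iff _ _).mp h4
          have hslice : PySem.List.slice iri.toList (some 25) none = t := by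
            rw [← ht, PySem.List.slice_from _ (by norm_num)]
            exact List.drop_left' (by decide)
          have hpart : pvPartition iri.toList =
              ("http://w3id.org/GDPRtEXT".toList, true, t) := by
            rw [← ht]
            show pvPartition ("http://w3id.org/GDPRtEXT".toList ++ '#' :: t) = _
            exact pvPartition_hash _ t (by decide)
          have hB : shorten_gdpr_iri_alt iri = String.ofList ("gdprtext:".toList ++ t) := by
            unfold shorten_gdpr_iri_alt
            rw [hpart]
            simp only []
            rw [tryScheme_https_http_head, tryScheme_self]
            simp
          rw [hB]
          simp only [Bool.not_eq_true] at h1 h2 h3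
          simp only [shorten_gdpr_iri, h1, h2, h3, Bool.false_eq_true, if_false, h4, if_true,
            hslice]
        · -- no base matches: both return iri unchanged
          rcases hpart : pvPartition iri.toList with ⟨a, s, f⟩
          obtain ⟨hna, hs1, hs0⟩ := pvPartition_spec _ a s f hpart
          have hpre : a <+: iri.toList := by
            cases s with
            | true => exact ⟨'#' :: f, (hs1 rfl).symm⟩
            | false => rw [(hs0 rfl).1]
          have hB : shorten_gdpr_iri_alt iri = iri := by
            unfold shorten_gdpr_iri_alt
            rw [hpart]
            simp only []
            have step : ∀ p : List Char,
                PySem.Chars.startswith iri.toList (p ++ "#".toList) ≠ true →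
                PySem.Chars.startswith iri.toList (p ++ "/".toList) ≠ true →
                pvTryScheme iri.toList p a s f = none ∨
                  pvTryScheme iri.toList p a s f = some iri.toList := by
              intro p hph hps
              by_cases hap : a = p
              · subst hap
                cases s with
                | true =>
                  exact absurd ((PySem.Chars.startswith_iff _ _).mpr
                    ⟨f, by rw [hs1 rfl]; simp⟩) hph
                | false =>
                  right
                  rw [tryScheme_self]
                  simp
              · left
                refine tryScheme_none _ _ _ _ _ hap ?_
                intro hb
                obtain ⟨r, hr⟩ := (PySem.Chars.startswith_iff _ _).mp hb
                exact hps ((PySem.Chars.startswith_iff _ _).mpr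
                  (List.IsPrefix.trans ⟨r, hr⟩ hpre))
            rcases step "https://w3id.org/GDPRtEXT".toList (by exact h3) (by exact h1) with
              hq | hq <;>
              rw [hq]
            · rcases step "http://w3id.org/GDPRtEXT".toList (by exact h4) (by exact h2) with
                hq' | hq' <;> rw [hq'] <;> simp
            · simp
          rw [hB]
          simp only [Bool.not_eq_true] at h1 h2 h3 h4
          unfold shorten_gdpr_iri
          rw [h1, h2, h3, h4]
          simp

-- ===== VERDICT (by name: the statement is the Claim_ definition above) =====
theorem shorten_gdpr_iri_spec : Claim_equal_shorten_gdpr_iri := by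
  intro iri _
  unfold Spec_shorten_gdpr_iri
  exact main_eq iri
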